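-- pv_equiv track=rewrite | github.com/phizzog/RecoverAI-Coach | backend/whoop_processor.py | _analyze_workout_intensity
-- ===== SOURCE A (Python) =====
-- from typing import List, Dict, Any
--
-- def _analyze_workout_intensity(workouts: List[Dict[str, Any]]) -> Dict[str, Any]:
--     """Analyze workout intensity distribution."""
--     if not workouts:
--         return None
--
--     intensities = {
--         "low": 0,
--         "moderate": 0,
--         "high": 0
--     }
--
--     for workout in workouts:
--         strain = workout.get('strain', 0)
--         if strain < 8:
--             intensities["low"] += 1
--         elif strain < 14:
--             intensities["moderate"] += 1
--         else:
--             intensities["high"] += 1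
--
--     return intensities
-- ===== SOURCE B (Python) =====
-- from typing import List, Dict, Any
--
-- def _analyze_workout_intensity(workouts: List[Dict[str, Any]]) -> Dict[str, Any]:
--     """Analyze workout intensity distribution."""
--     if not workouts:
--         return None
--     low = sum(1 for w in workouts if w.get('strain', 0) < 8)
--     moderate = sum(1 for w in workouts if 8 <= w.get('strain', 0) < 14)
--     high = sum(1 for w in workouts if w.get('strain', 0) >= 14)
--     return {"low": low, "moderate": moderate, "high": high}
-- ===== Notes on version B (the rewrite author's own statement) =====
-- stated objective: alternative
-- what changed: Replaces A's single loop with an if/elif chain mutating a counter dict by three independent filtered counts over the list, with the partition boundaries stated as explicit ranges, assembled into the result dict at the end.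
import Mathlib
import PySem

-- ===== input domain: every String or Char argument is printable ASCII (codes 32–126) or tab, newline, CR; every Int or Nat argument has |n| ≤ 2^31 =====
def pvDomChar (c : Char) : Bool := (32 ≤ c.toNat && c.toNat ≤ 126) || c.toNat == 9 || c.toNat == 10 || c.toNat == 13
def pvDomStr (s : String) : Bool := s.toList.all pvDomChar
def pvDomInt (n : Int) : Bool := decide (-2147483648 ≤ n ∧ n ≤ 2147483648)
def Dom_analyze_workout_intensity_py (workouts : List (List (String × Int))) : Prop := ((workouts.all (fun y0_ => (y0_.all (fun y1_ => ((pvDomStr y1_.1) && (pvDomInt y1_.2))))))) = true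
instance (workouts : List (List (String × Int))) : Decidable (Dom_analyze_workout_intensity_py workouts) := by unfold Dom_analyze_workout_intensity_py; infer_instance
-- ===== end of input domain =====

-- B replaces A's single classifying pass with three independent filtered counts (alternative decomposition, same cost).


-- ===== PORT A =====
def analyze_workout_intensity_py (workouts : List (List (String × Int))) : Option (List (String × Int)) :=
  if workouts = [] then none
  else
    let init : PySem.Dict String Int := PySem.Dict.ofList [("low", 0), ("moderate", 0), ("high", 0)]
    let final := workouts.foldl (fun d w =>
      let strain := (w.lookup "strain").getD 0
      if strain < 8 then d.modify "low" 0 (· + 1)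
      else if strain < 14 then d.modify "moderate" 0 (· + 1)
      else d.modify "high" 0 (· + 1)) init
    some final.items

-- ===== PORT B =====
def analyze_workout_intensity_py_alt (workouts : List (List (String × Int))) : Option (List (String × Int)) :=
  match workouts with
  | [] => none
  | _ =>
    let strain := fun (w : List (String × Int)) => ((w.lookup "strain").getD 0 : Int)
    let low : Int := workouts.countP (fun w => strain w < 8)
    let moderate : Int := workouts.countP (fun w => 8 ≤ strain w ∧ strain w < 14)
    let high : Int := workouts.countP (fun w => 14 ≤ strain w)
    some [("low", low), ("moderate", moderate), ("high", high)]

-- ===== PRECONDITION & SPEC =====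
def Spec_analyze_workout_intensity_py (workouts : List (List (String × Int))) (out : Option (List (String × Int))) : Prop := out = analyze_workout_intensity_py_alt workouts
instance (workouts : List (List (String × Int))) (out : Option (List (String × Int))) : Decidable (Spec_analyze_workout_intensity_py workouts out) := by unfold Spec_analyze_workout_intensity_py; infer_instance

-- ===== CLAIM (what is proved, stated in full; the proofs are below) =====
def Claim_equal_analyze_workout_intensity_py : Prop := ∀ (workouts : List (List (String × Int))), Dom_analyze_workout_intensity_py workouts → Spec_analyze_workout_intensity_py workouts (analyze_workout_intensity_py workouts)

-- ===== LEMMAS AND PROOFS =====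

-- Loop invariant for A's fold: starting from counters (a, b, c), the fold adds the three filtered counts.
lemma fold_counts (ws : List (List (String × Int))) (a b c : Int) :
    (ws.foldl (fun d w =>
      let strain := ((w.lookup "strain").getD 0 : Int)
      if strain < 8 then d.modify "low" 0 (· + 1)
      else if strain < 14 then d.modify "moderate" 0 (· + 1)
      else d.modify "high" 0 (· + 1))
      (PySem.Dict.ofList [("low", a), ("moderate", b), ("high", c)])).items =
    [("low", a + (ws.countP (fun w => ((w.lookup "strain").getD 0 : Int) < 8) : Int)),
     ("moderate", b + (ws.countP (fun w => 8 ≤ ((w.lookup "strain").getD 0 : Int) ∧ ((w.lookup "strain").getD 0 : Int) < 14) : Int)),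
     ("high", c + (ws.countP (fun w => 14 ≤ ((w.lookup "strain").getD 0 : Int)) : Int))] := by
  induction ws generalizing a b c with
  | nil =>
    have : (PySem.Dict.ofList [("low", a), ("moderate", b), ("high", c)]).items = [("low", a), ("moderate", b), ("high", c)] := rfl
    simp [this]
  | cons w ws ih =>
    simp only [List.foldl_cons, List.countP_cons]
    by_cases h8 : ((w.lookup "strain").getD 0 : Int) < 8
    · have hstep : (let strain := ((w.lookup "strain").getD 0 : Int)
        if strain < 8 then (PySem.Dict.ofList [("low", a), ("moderate", b), ("high", c)]).modify "low" 0 (· + 1)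
        else if strain < 14 then (PySem.Dict.ofList [("low", a), ("moderate", b), ("high", c)]).modify "moderate" 0 (· + 1)
        else (PySem.Dict.ofList [("low", a), ("moderate", b), ("high", c)]).modify "high" 0 (· + 1))
          = PySem.Dict.ofList [("low", a + 1), ("moderate", b), ("high", c)] := by
        simp only []
        rw [if_pos h8]; rfl
      rw [hstep, ih]
      have : ¬ (8 ≤ ((w.lookup "strain").getD 0 : Int) ∧ ((w.lookup "strain").getD 0 : Int) < 14) := by omega
      have : ¬ (14 ≤ ((w.lookup "strain").getD 0 : Int)) := by omega
      simp_all; omega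
    · by_cases h14 : ((w.lookup "strain").getD 0 : Int) < 14
      · have hstep : (let strain := ((w.lookup "strain").getD 0 : Int)
          if strain < 8 then (PySem.Dict.ofList [("low", a), ("moderate", b), ("high", c)]).modify "low" 0 (· + 1)
          else if strain < 14 then (PySem.Dict.ofList [("low", a), ("moderate", b), ("high", c)]).modify "moderate" 0 (· + 1)
          else (PySem.Dict.ofList [("low", a), ("moderate", b), ("high", c)]).modify "high" 0 (· + 1))
            = PySem.Dict.ofList [("low", a), ("moderate", b + 1), ("high", c)] := by
          simp only []
          rw [if_neg h8, if_pos h14]; rfl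
        rw [hstep, ih]
        have h : (8 ≤ ((w.lookup "strain").getD 0 : Int) ∧ ((w.lookup "strain").getD 0 : Int) < 14) := by omega
        have : ¬ (14 ≤ ((w.lookup "strain").getD 0 : Int)) := by omega
        simp_all; omega
      · have hstep : (let strain := ((w.lookup "strain").getD 0 : Int)
          if strain < 8 then (PySem.Dict.ofList [("low", a), ("moderate", b), ("high", c)]).modify "low" 0 (· + 1)
          else if strain < 14 then (PySem.Dict.ofList [("low", a), ("moderate", b), ("high", c)]).modify "moderate" 0 (· + 1)
          else (PySem.Dict.ofList [("low", a), ("moderate", b), ("high", c)]).modify "high" 0 (· + 1))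
            = PySem.Dict.ofList [("low", a), ("moderate", b), ("high", c + 1)] := by
          simp only []
          rw [if_neg h8, if_neg h14]; rfl
        rw [hstep, ih]
        have : ¬ (8 ≤ ((w.lookup "strain").getD 0 : Int) ∧ ((w.lookup "strain").getD 0 : Int) < 14) := by omega
        have h : (14 ≤ ((w.lookup "strain").getD 0 : Int)) := by omega
        simp_all; omega

-- ===== VERDICT (by name: the statement is the Claim_ definition above) =====
theorem analyze_workout_intensity_py_spec : Claim_equal_analyze_workout_intensity_py := by
  intro ws _
  unfold Spec_analyze_workout_intensity_py analyze_workout_intensity_py analyze_workout_intensity_py_alt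
  cases ws with
  | nil => rfl
  | cons w ws =>
    simp only [if_neg (List.cons_ne_nil w ws)]
    rw [fold_counts]
    simp
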